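-- pv_equiv track=rewrite | github.com/Viknesh-Rajaramon/Leetcode-Problems | Algorithms/Hard/3757_Number_of_Effective_Subsequences.py | countEffective
-- ===== SOURCE A (Python) =====
-- from typing import List
--
-- def countEffective(nums: List[int]) -> int:
--     mod, total_or = 10**9 + 7, 0
--     for num in nums:
--         total_or |= num
--
--     important_bits = []
--     for b in range(20):
--         if (total_or >> b) & 1:
--             important_bits.append(b)
--
--     k = len(important_bits)
--     full_mask, freq = (1 << k) - 1, [0] * (1 << k)
--
--     for num in nums:
--         mask = 0
--         for i, bit in enumerate(important_bits):
--             if (num >> bit) & 1: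
--                 mask |= 1 << i
--
--         freq[mask] += 1
--
--     F = freq[:]
--     for i in range(k):
--         for mask in range(1 << k):
--             if mask & (1 << i):
--                 F[mask] += F[mask ^ (1 << i)]
--
--     n = len(nums)
--     pow_2 = [1] * (n+1)
--     for i in range(1, n+1):
--         pow_2[i] = pow_2[i-1] * 2 % mod
--
--     result = 0
--     for mask in range(1, 1 << k):
--         if bin(mask).count("1") % 2 == 1:
--             result = (result + pow_2[F[full_mask ^ mask]]) % mod
--         else:
--             result = (result - pow_2[F[full_mask ^ mask]]) % mod
--
--     return result % mod
-- ===== SOURCE B (Python) =====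
-- from typing import List
--
--
-- def countEffective(nums: List[int]) -> int:
--     mod = 10**9 + 7
--     total = 0
--     for num in nums:
--         total |= num
--
--     bits = [b for b in range(20) if (total >> b) & 1]
--     k = len(bits)
--
--     freq = [0] * (1 << k)
--     for num in nums:
--         mask = 0
--         for i, bit in enumerate(bits):
--             if (num >> bit) & 1:
--                 mask |= 1 << i
--         freq[mask] += 1
--
--     def disjoint_counts(f):
--         # g[s] = sum of f[m] over all indices m with m & s == 0,
--         # computed by divide and conquer on the top bit.
--         if len(f) <= 1:
--             return f
--         half = len(f) // 2
--         lo = disjoint_counts(f[:half])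
--         hi = disjoint_counts(f[half:])
--         return [lo[s] + hi[s] for s in range(half)] + lo
--
--     g = disjoint_counts(freq)
--
--     result = 0
--     for s in range(1, 1 << k):
--         t = pow(2, g[s], mod)
--         if bin(s).count("1") % 2 == 1:
--             result += t
--         else:
--             result -= t
--     return result % mod
-- ===== Notes on version B (the rewrite author's own statement) =====
-- stated objective: alternative
-- what changed: B replaces A's frequency-array + in-place SOS butterfly + inclusion-exclusion over complemented masks with a pow-table by a recursive divide-and-conquer 'disjoint-count' transform (g[s] = number of elements whose mask is disjoint from s, computed by splitting on the top bit) and Python's three-argument pow, summing the signed terms once and reducing mod p at the end.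
import Mathlib
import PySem

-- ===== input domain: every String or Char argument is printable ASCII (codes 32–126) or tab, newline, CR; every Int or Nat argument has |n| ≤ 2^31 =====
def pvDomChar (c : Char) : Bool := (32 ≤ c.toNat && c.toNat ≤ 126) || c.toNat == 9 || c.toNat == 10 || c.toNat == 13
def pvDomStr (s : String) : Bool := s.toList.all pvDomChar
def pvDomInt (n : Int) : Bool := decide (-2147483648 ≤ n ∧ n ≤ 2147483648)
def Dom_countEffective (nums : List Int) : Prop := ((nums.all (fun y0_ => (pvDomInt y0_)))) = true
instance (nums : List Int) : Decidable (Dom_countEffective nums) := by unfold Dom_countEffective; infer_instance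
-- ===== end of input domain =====

-- B replaces A's in-place subset-sum (SOS) butterfly + complement indexing + power table with a
-- divide-and-conquer "disjoint-count" transform and modular pow; objective: alternative algorithm.

-- ===== PORT A =====
-- Helpers shared by both ports: they transliterate Python code that is IDENTICAL in Source A and Source B
-- (total OR accumulation, important-bit extraction, per-number mask building, frequency table).
-- (x >> b) & 1 == 1  (two's-complement-exact on negatives via PySem)
def pvBitOn (x : Int) (b : Nat) : Bool := PySem.Int.band (x >>> b) 1 == 1
def pvTotalOr (nums : List Int) : Int := nums.foldl (fun acc num => PySem.Int.bor acc num) 0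
def pvBits (t : Int) : List Nat :=
  (List.range 20).foldl (fun acc b => if pvBitOn t b then acc ++ [b] else acc) []
-- 'for i, bit in enumerate(important_bits): if (num >> bit) & 1: mask |= 1 << i'
def pvMaskAux (num : Int) : List Nat → Nat → Nat → Nat
  | [], _, m => m
  | bit :: rest, i, m => pvMaskAux num rest (i + 1) (if pvBitOn num bit then m ||| (1 <<< i) else m)
def pvMask (num : Int) (bits : List Nat) : Nat := pvMaskAux num bits 0 0
-- 'freq = [0] * (1 << k); for num in nums: … freq[mask] += 1'  (Python list = array)
def pvFreq (nums : List Int) (bits : List Nat) : Array Int :=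
  nums.foldl (fun F num => F.setIfInBounds (pvMask num bits) (F.getD (pvMask num bits) 0 + 1))
    (Array.replicate (1 <<< bits.length) 0)

def countEffective (nums : List Int) : Int :=
  let md : Int := 10 ^ 9 + 7
  let total_or := pvTotalOr nums
  let important_bits := pvBits total_or
  let k := important_bits.length
  let full_mask : Nat := (1 <<< k) - 1
  let freq := pvFreq nums important_bits
  -- 'F = freq[:]; for i in range(k): for mask in range(1 << k): if mask & (1 << i): F[mask] += F[mask ^ (1 << i)]'
  let F := (List.range k).foldl (fun F i =>
    (List.range (1 <<< k)).foldl (fun F mask =>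
      if (mask &&& (1 <<< i)) != 0 then
        F.setIfInBounds mask (F.getD mask 0 + F.getD (mask ^^^ (1 <<< i)) 0)
      else F) F) freq
  let n := nums.length
  -- 'pow_2 = [1] * (n+1); for i in range(1, n+1): pow_2[i] = pow_2[i-1] * 2 % mod'
  let pow_2 := (List.range' 1 n).foldl
    (fun P i => P.setIfInBounds i (PySem.Int.mod (P.getD (i - 1) 1 * 2) md))
    (Array.replicate (n + 1) 1)
  -- final loop; bin(mask).count("1") is PySem.Int.bitCount; F values are counts (≥ 0), so .toNat is exact
  let result := (List.range' 1 ((1 <<< k) - 1)).foldl (fun (result : Int) (mask : Nat) =>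
    if PySem.Int.bitCount (mask : Int) % 2 == 1 then
      PySem.Int.mod (result + pow_2.getD (F.getD (full_mask ^^^ mask) 0).toNat 1) md
    else
      PySem.Int.mod (result - pow_2.getD (F.getD (full_mask ^^^ mask) 0).toNat 1) md) 0
  PySem.Int.mod result md

-- ===== PORT B =====
-- 'def disjoint_counts(f): …' — divide and conquer on the top bit; g[s] = Σ f[m] over m & s == 0
def pvDisj (f : Array Int) : Array Int :=
  if f.size ≤ 1 then f
  else
    let half := f.size / 2
    let lo := pvDisj (f.extract 0 half)
    let hi := pvDisj (f.extract half f.size)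
    ((Array.range half).map fun s => lo.getD s 0 + hi.getD s 0) ++ lo
termination_by f.size
decreasing_by
  · simp only [Array.size_extract]; omega
  · simp only [Array.size_extract]; omega

def countEffective_alt (nums : List Int) : Int :=
  let md : Int := 10 ^ 9 + 7
  let total := pvTotalOr nums
  let bits := pvBits total
  let k := bits.length
  let freq := pvFreq nums bits
  let g := pvDisj freq
  -- 't = pow(2, g[s], mod)' — g entries are counts (≥ 0), so .toNat is exact
  let result := (List.range' 1 ((1 <<< k) - 1)).foldl (fun (result : Int) (s : Nat) =>
    let t := PySem.Int.powMod 2 (g.getD s 0).toNat md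
    if PySem.Int.bitCount (s : Int) % 2 == 1 then result + t else result - t) 0
  PySem.Int.mod result md

-- ===== PRECONDITION & SPEC =====
def Spec_countEffective (nums : List Int) (out : Int) : Prop := out = countEffective_alt nums
instance (nums : List Int) (out : Int) : Decidable (Spec_countEffective nums out) := by unfold Spec_countEffective; infer_instance

-- ===== CLAIM (what is proved, stated in full; the proofs are below) =====
def Claim_equal_countEffective : Prop := ∀ (nums : List Int), Dom_countEffective nums → Spec_countEffective nums (countEffective nums)

-- ===== LEMMAS AND PROOFS =====

-- list twins of the array-valued port helpers (proof infrastructure only)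
def pvFreqL (nums : List Int) (bits : List Nat) : List Int :=
  nums.foldl (fun F num => F.set (pvMask num bits) (F.getD (pvMask num bits) 0 + 1))
    (List.replicate (1 <<< bits.length) 0)

def pvDisjL (f : List Int) : List Int :=
  if f.length ≤ 1 then f
  else
    let half := f.length / 2
    let lo := pvDisjL (f.take half)
    let hi := pvDisjL (f.drop half)
    ((List.range half).map fun s => lo.getD s 0 + hi.getD s 0) ++ lo
termination_by f.length
decreasing_by
  · simp only [List.length_take]; omega
  · simp only [List.length_drop]; omega

theorem arr_getD (a : Array Int) (i : Nat) (d : Int) : a.getD i d = a.toList.getD i d := by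
  unfold Array.getD
  split
  · next h =>
    rw [List.getD_eq_getElem?_getD, List.getElem?_eq_getElem (by simpa using h)]
    simp
  · next h =>
    rw [List.getD_eq_getElem?_getD, List.getElem?_eq_none (by simpa using h)]
    rfl

theorem foldl_toList {σ : Type} (g : Array Int → σ → Array Int) (g' : List Int → σ → List Int)
    (h : ∀ a s, (g a s).toList = g' a.toList s) :
    ∀ (l : List σ) (A : Array Int), (l.foldl g A).toList = l.foldl g' A.toList := by
  intro l
  induction l with
  | nil => intro A; rfl
  | cons s rest ih =>
    intro A
    rw [List.foldl_cons, List.foldl_cons, ih, h]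

theorem pvFreq_toList (nums : List Int) (bits : List Nat) :
    (pvFreq nums bits).toList = pvFreqL nums bits := by
  unfold pvFreq pvFreqL
  rw [foldl_toList _ _ ?_ nums, Array.toList_replicate]
  intro a num
  rw [Array.toList_setIfInBounds, arr_getD]

-- t agrees with m on bits of [0,k): below i as a submask, from i upward exactly
def agreeB (i k t m : Nat) : Bool :=
  (List.range k).all fun b => if b < i then !(t.testBit b) || m.testBit b else t.testBit b == m.testBit b

theorem agreeB_iff (i k t m : Nat) : agreeB i k t m = true ↔
    ∀ b, b < k → (b < i → t.testBit b = true → m.testBit b = true) ∧ (i ≤ b → t.testBit b = m.testBit b) := by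
  unfold agreeB
  simp only [List.all_eq_true, List.mem_range]
  constructor
  · intro h b hb
    have hb' := h b hb
    constructor
    · intro hbi ht
      rw [if_pos hbi, ht] at hb'
      simpa using hb'
    · intro hib
      rw [if_neg (by omega)] at hb'
      exact beq_iff_eq.mp hb'
  · intro h b hb
    rcases h b hb with ⟨h1, h2⟩
    by_cases hbi : b < i
    · rw [if_pos hbi]
      cases ht : t.testBit b
      · simp
      · simp [h1 hbi ht]
    · rw [if_neg hbi, h2 (by omega)]
      simp

theorem pvMaskAux_lt (num : Int) (l : List Nat) : ∀ (i m : Nat), m < 2 ^ i →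
    pvMaskAux num l i m < 2 ^ (i + l.length) := by
  induction l with
  | nil => intro i m hm; simpa using hm
  | cons bit rest ih =>
    intro i m hm
    rw [pvMaskAux]
    have h2 : (if pvBitOn num bit then m ||| (1 <<< i) else m) < 2 ^ (i + 1) := by
      have hlt : (2 : Nat) ^ i < 2 ^ (i + 1) := Nat.pow_lt_pow_right (by norm_num) (by omega)
      split
      · rw [show (1 <<< i) = 2 ^ i by simp [Nat.shiftLeft_eq]]
        exact Nat.or_lt_two_pow (lt_trans hm hlt) hlt
      · exact lt_trans hm hlt
    have h3 := ih (i + 1) _ h2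
    have : i + 1 + rest.length = i + (rest.length + 1) := by omega
    rw [this] at h3
    simpa using h3

theorem pvMask_lt (num : Int) (bits : List Nat) : pvMask num bits < 2 ^ bits.length := by
  have := pvMaskAux_lt num bits 0 0 (by norm_num)
  simpa using this

theorem getD_set (F : List Int) (a : Nat) (x : Int) (b : Nat) (d : Int) :
    (F.set a x).getD b d = if a = b ∧ a < F.length then x else F.getD b d := by
  by_cases h : a = b ∧ a < F.length
  · obtain ⟨rfl, hl⟩ := h
    rw [if_pos ⟨rfl, hl⟩, List.getD_eq_getElem?_getD, List.getElem?_set_self hl]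
    rfl
  · rw [if_neg h]
    by_cases hab : a = b
    · subst hab
      have hge : F.length ≤ a := by
        by_contra hc
        exact h ⟨rfl, by omega⟩
      rw [List.set_eq_of_length_le hge]
    · simp [List.getD_eq_getElem?_getD, List.getElem?_set_ne hab]

theorem pvFreq_fold (bits : List Nat) (nums : List Int) : ∀ (F : List Int),
    F.length = 2 ^ bits.length →
    (nums.foldl (fun F num => F.set (pvMask num bits) (F.getD (pvMask num bits) 0 + 1)) F).length
        = F.length ∧
    ∀ m, (nums.foldl (fun F num => F.set (pvMask num bits) (F.getD (pvMask num bits) 0 + 1)) F).getD m 0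
        = F.getD m 0 + ((nums.map fun num => pvMask num bits).countP (fun t => t == m) : Int) := by
  induction nums with
  | nil => intro F _; simp
  | cons num rest ih =>
    intro F hF
    simp only [List.foldl_cons, List.map_cons, List.countP_cons]
    have haF : pvMask num bits < F.length := hF ▸ pvMask_lt num bits
    have hF'len : (F.set (pvMask num bits) (F.getD (pvMask num bits) 0 + 1)).length
        = 2 ^ bits.length := by rw [List.length_set]; exact hF
    obtain ⟨ihlen, ihget⟩ := ih _ hF'len
    refine ⟨by rw [ihlen, List.length_set], ?_⟩
    intro m
    rw [ihget m, getD_set]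
    by_cases ham : pvMask num bits = m
    · rw [if_pos ⟨ham, haF⟩]
      subst ham
      simp only [BEq.rfl, if_pos]
      push_cast
      ring
    · rw [if_neg (by tauto)]
      have hbe : (pvMask num bits == m) = false := by simp [ham]
      rw [hbe]
      push_cast
      ring

theorem pvFreq_length (nums : List Int) (bits : List Nat) :
    (pvFreqL nums bits).length = 2 ^ bits.length := by
  unfold pvFreqL
  rw [(pvFreq_fold bits nums (List.replicate (1 <<< bits.length) 0)
    (by simp [Nat.shiftLeft_eq])).1]
  simp [Nat.shiftLeft_eq]

theorem pvFreq_getD (nums : List Int) (bits : List Nat) (m : Nat) :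
    (pvFreqL nums bits).getD m 0 =
      ((nums.map fun num => pvMask num bits).countP (fun t => t == m) : Int) := by
  unfold pvFreqL
  rw [(pvFreq_fold bits nums (List.replicate (1 <<< bits.length) 0)
    (by simp [Nat.shiftLeft_eq])).2 m]
  simp

theorem countP_or_disj {α : Type} (l : List α) (p q : α → Bool)
    (h : ∀ x ∈ l, ¬(p x = true ∧ q x = true)) :
    l.countP (fun x => p x || q x) = l.countP p + l.countP q := by
  induction l with
  | nil => simp
  | cons x rest ih =>
    simp only [List.countP_cons]
    have hx := h x (by simp)
    have hrest := ih fun y hy => h y (by simp [hy])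
    cases hp : p x <;> cases hq : q x <;> simp_all <;> omega

theorem boolext (a b : Bool) (h : a = true ↔ b = true) : a = b := by
  cases a <;> cases b <;> simp_all

theorem testBit_ge (x n b : Nat) (hx : x < 2 ^ n) (hb : n ≤ b) : x.testBit b = false :=
  Nat.testBit_lt_two_pow (lt_of_lt_of_le hx (Nat.pow_le_pow_right (by norm_num) hb))

theorem testBit_xor_pow (m i b : Nat) :
    (m ^^^ 2 ^ i).testBit b = (m.testBit b ^^ decide (i = b)) := by
  rw [Nat.testBit_xor, Nat.testBit_two_pow]

theorem and_eq_zero_iff' (t s : Nat) :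
    t &&& s = 0 ↔ ∀ b, ¬(t.testBit b = true ∧ s.testBit b = true) := by
  constructor
  · intro h b hb
    have := congrArg (fun x => Nat.testBit x b) h
    simp only [Nat.testBit_and, Nat.zero_testBit] at this
    rw [hb.1, hb.2] at this
    simp at this
  · intro h
    apply Nat.eq_of_testBit_eq
    intro b
    rw [Nat.testBit_and, Nat.zero_testBit]
    have := h b
    cases ht : t.testBit b <;> cases hs : s.testBit b <;> simp_all

theorem agree_zero (k t m : Nat) (ht : t < 2 ^ k) (hm : m < 2 ^ k) :
    agreeB 0 k t m = (t == m) := by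
  apply boolext
  rw [agreeB_iff, beq_iff_eq]
  constructor
  · intro h
    apply Nat.eq_of_testBit_eq
    intro b
    by_cases hb : b < k
    · exact (h b hb).2 (Nat.zero_le b)
    · rw [testBit_ge t k b ht (by omega), testBit_ge m k b hm (by omega)]
  · rintro rfl
    exact fun b _ => ⟨fun hb0 _ => by omega, fun _ => rfl⟩

theorem agree_clear (i k t m : Nat) (hik : i < k) (hm : m.testBit i = false) :
    agreeB (i + 1) k t m = agreeB i k t m := by
  apply boolext
  rw [agreeB_iff, agreeB_iff]
  constructor
  · intro h b hb
    refine ⟨fun hbi ht => (h b hb).1 (by omega) ht, fun hib => ?_⟩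
    by_cases hbe : b = i
    · subst hbe
      cases ht : t.testBit b
      · rw [hm]
      · exact absurd ((h b hb).1 (by omega) ht) (by rw [hm]; simp)
    · exact (h b hb).2 (by omega)
  · intro h b hb
    refine ⟨fun hbi ht => ?_, fun hib => (h b hb).2 (by omega)⟩
    by_cases hbe : b = i
    · subst hbe
      rw [← (h b hb).2 le_rfl]
      exact ht
    · exact (h b hb).1 (by omega) ht

theorem agree_set (i k t m : Nat) (hik : i < k) (hm : m.testBit i = true) :
    agreeB (i + 1) k t m = (agreeB i k t m || agreeB i k t (m ^^^ 2 ^ i)) := by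
  apply boolext
  rw [Bool.or_eq_true, agreeB_iff, agreeB_iff, agreeB_iff]
  constructor
  · intro h
    cases ht : t.testBit i
    · right
      intro b hb
      constructor
      · intro hbi htb
        rw [testBit_xor_pow]
        have hd : decide (i = b) = false := by simp; omega
        rw [hd]
        simp only [Bool.xor_false]
        exact (h b hb).1 (by omega) htb
      · intro hib
        rw [testBit_xor_pow]
        by_cases hbe : b = i
        · subst hbe
          have hd : decide (b = b) = true := by simp
          rw [hd, hm]
          simpa using ht
        · have hd : decide (i = b) = false := by simp; omega
          rw [hd]
          simp only [Bool.xor_false]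
          exact (h b hb).2 (by omega)
    · left
      intro b hb
      constructor
      · intro hbi htb
        exact (h b hb).1 (by omega) htb
      · intro hib
        by_cases hbe : b = i
        · subst hbe
          rw [ht, hm]
        · exact (h b hb).2 (by omega)
  · rintro (h | h) <;> intro b hb
    · refine ⟨fun hbi htb => ?_, fun hib => (h b hb).2 (by omega)⟩
      by_cases hbe : b = i
      · subst hbe
        rw [← (h b hb).2 le_rfl]
        exact htb
      · exact (h b hb).1 (by omega) htb
    · refine ⟨fun hbi htb => ?_, fun hib => ?_⟩
      · by_cases hbe : b = i
        · subst hbe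
          have := (h b hb).2 le_rfl
          rw [testBit_xor_pow, hm] at this
          have hd : decide (b = b) = true := by simp
          rw [hd] at this
          simp at this
          rw [htb] at this
          exact absurd this (by simp)
        · have := (h b hb).1 (by omega) htb
          rw [testBit_xor_pow] at this
          have hd : decide (i = b) = false := by simp; omega
          rw [hd] at this
          simpa using this
      · have := (h b hb).2 (by omega)
        rw [testBit_xor_pow] at this
        have hd : decide (i = b) = false := by simp; omega
        rw [hd] at this
        simpa using this

theorem agree_disj (i k t m : Nat) (hik : i < k) (hm : m.testBit i = true) :
    ¬(agreeB i k t m = true ∧ agreeB i k t (m ^^^ 2 ^ i) = true) := by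
  rintro ⟨h1, h2⟩
  rw [agreeB_iff] at h1 h2
  have e1 := (h1 i hik).2 le_rfl
  have e2 := (h2 i hik).2 le_rfl
  rw [testBit_xor_pow, hm] at e2
  have hd : decide (i = i) = true := by simp
  rw [hd] at e2
  simp only [Bool.true_xor, Bool.not_true] at e2
  rw [e1, hm] at e2
  exact absurd e2 (by simp)

theorem cond_testBit (mask i : Nat) : ((mask &&& 2 ^ i) != 0) = mask.testBit i := by
  rw [Nat.and_two_pow]
  cases h : mask.testBit i
  · simp
  · simp

theorem inner_fold (i K : Nat) : ∀ (l : List Nat), l.Nodup → (∀ a ∈ l, a < K) →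
    ∀ (F F0 : List Int), F.length = K → F0.length = K →
    (∀ m, m.testBit i = false → F.getD m 0 = F0.getD m 0) →
    (l.foldl (fun F mask =>
        if (mask &&& 2 ^ i) != 0 then F.set mask (F.getD mask 0 + F.getD (mask ^^^ 2 ^ i) 0)
        else F) F).length = K ∧
    ∀ m, (l.foldl (fun F mask =>
        if (mask &&& 2 ^ i) != 0 then F.set mask (F.getD mask 0 + F.getD (mask ^^^ 2 ^ i) 0)
        else F) F).getD m 0 =
      if m ∈ l ∧ m.testBit i = true then F.getD m 0 + F0.getD (m ^^^ 2 ^ i) 0 else F.getD m 0 := by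
  intro l
  induction l with
  | nil =>
    intro _ _ F F0 hF _ _
    simp only [List.foldl_nil]
    exact ⟨hF, fun m => by rw [if_neg (by simp)]⟩
  | cons a rest ih =>
    intro hnd hal F F0 hF hF0 hside
    rcases List.nodup_cons.mp hnd with ⟨hna, hnd'⟩
    have ha : a < K := hal a (by simp)
    simp only [List.foldl_cons]
    rw [cond_testBit a i]
    cases hta : a.testBit i
    · simp only [Bool.false_eq_true, if_false]
      obtain ⟨len, get⟩ := ih hnd' (fun x hx => hal x (by simp [hx])) F F0 hF hF0 hside
      refine ⟨len, fun m => ?_⟩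
      rw [get m]
      by_cases hm : m ∈ rest ∧ m.testBit i = true
      · rw [if_pos hm, if_pos ⟨by simp [hm.1], hm.2⟩]
      · rw [if_neg hm, if_neg ?_]
        rintro ⟨hmem, htb⟩
        rcases List.mem_cons.mp hmem with rfl | hmem'
        · rw [hta] at htb; exact absurd htb (by simp)
        · exact hm ⟨hmem', htb⟩
    · simp only [if_true]
      have hxa : (a ^^^ 2 ^ i).testBit i = false := by
        rw [testBit_xor_pow, hta]
        simp
      have hside' : ∀ m, m.testBit i = false →
          (F.set a (F.getD a 0 + F.getD (a ^^^ 2 ^ i) 0)).getD m 0 = F0.getD m 0 := by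
        intro m hmb
        rw [getD_set, if_neg ?_]
        · exact hside m hmb
        · rintro ⟨rfl, _⟩
          rw [hta] at hmb
          exact absurd hmb (by simp)
      obtain ⟨len, get⟩ := ih hnd' (fun x hx => hal x (by simp [hx]))
        (F.set a (F.getD a 0 + F.getD (a ^^^ 2 ^ i) 0)) F0
        (by rw [List.length_set]; exact hF) hF0 hside'
      refine ⟨len, fun m => ?_⟩
      rw [get m]
      by_cases hm : m ∈ rest ∧ m.testBit i = true
      · have hma : m ≠ a := fun hc => hna (hc ▸ hm.1)
        rw [if_pos hm, if_pos ⟨by simp [hm.1], hm.2⟩, getD_set, if_neg (by tauto)]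
      · rw [if_neg hm]
        by_cases hma : m = a
        · subst hma
          rw [if_pos ⟨by simp, hta⟩, getD_set, if_pos ⟨rfl, by omega⟩,
            hside (m ^^^ 2 ^ i) (by rw [testBit_xor_pow, hta]; simp)]
        · rw [if_neg ?_, getD_set, if_neg (by tauto)]
          rintro ⟨hmem, htb⟩
          rcases List.mem_cons.mp hmem with rfl | hmem'
          · exact hma rfl
          · exact hm ⟨hmem', htb⟩

theorem sos_inv (k : Nat) (msks : List Nat) (hmsk : ∀ x ∈ msks, x < 2 ^ k)
    (freq : List Int) (hlen : freq.length = 2 ^ k)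
    (hfreq : ∀ m, m < 2 ^ k → freq.getD m 0 = (msks.countP (fun t => t == m) : Int)) :
    ∀ i, i ≤ k →
      ((List.range i).foldl (fun F i =>
        (List.range (2 ^ k)).foldl (fun F mask =>
          if (mask &&& 2 ^ i) != 0 then F.set mask (F.getD mask 0 + F.getD (mask ^^^ 2 ^ i) 0)
          else F) F) freq).length = 2 ^ k ∧
      ∀ m, m < 2 ^ k →
        ((List.range i).foldl (fun F i =>
          (List.range (2 ^ k)).foldl (fun F mask =>
            if (mask &&& 2 ^ i) != 0 then F.set mask (F.getD mask 0 + F.getD (mask ^^^ 2 ^ i) 0)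
            else F) F) freq).getD m 0 = (msks.countP (fun t => agreeB i k t m) : Int) := by
  intro i
  induction i with
  | zero =>
    intro _
    simp only [List.range_zero, List.foldl_nil]
    refine ⟨hlen, fun m hm => ?_⟩
    rw [hfreq m hm]
    congr 1
    apply List.countP_congr
    intro t htm
    rw [agree_zero k t m (hmsk t htm) hm]
  | succ i ihi =>
    intro hik
    obtain ⟨plen, pget⟩ := ihi (by omega)
    rw [List.range_succ, List.foldl_append, List.foldl_cons, List.foldl_nil]
    obtain ⟨ilen, iget⟩ := inner_fold i (2 ^ k) (List.range (2 ^ k)) List.nodup_range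
      (fun a haa => List.mem_range.mp haa) _ _ plen plen (fun m _ => rfl)
    refine ⟨ilen, fun m hm => ?_⟩
    rw [iget m]
    by_cases htb : m.testBit i = true
    · rw [if_pos ⟨List.mem_range.mpr hm, htb⟩, pget m hm,
        pget (m ^^^ 2 ^ i) (Nat.xor_lt_two_pow hm (Nat.pow_lt_pow_right (by norm_num) (by omega)))]
      have hsplit : (msks.countP (fun t => agreeB (i + 1) k t m))
          = msks.countP (fun t => agreeB i k t m)
            + msks.countP (fun t => agreeB i k t (m ^^^ 2 ^ i)) := by
        rw [List.countP_congr (fun t _ => by rw [agree_set i k t m (by omega) htb]),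
          countP_or_disj msks _ _ (fun x _ => agree_disj i k x m (by omega) htb)]
      rw [hsplit]
      push_cast
      ring
    · rw [if_neg (by tauto), pget m hm]
      congr 1
      apply List.countP_congr
      intro t _
      rw [agree_clear i k t m (by omega) (by revert htb; cases m.testBit i <;> simp)]

theorem agree_final (k t s : Nat) (ht : t < 2 ^ k) (_hs : s < 2 ^ k) :
    agreeB k k t ((2 ^ k - 1) ^^^ s) = (t &&& s == 0) := by
  apply boolext
  rw [agreeB_iff, beq_iff_eq, and_eq_zero_iff']
  have hfb : ∀ b, ((2 ^ k - 1) ^^^ s).testBit b = (decide (b < k) ^^ s.testBit b) := by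
    intro b
    rw [Nat.testBit_xor, Nat.testBit_two_pow_sub_one]
  constructor
  · intro h b hb
    by_cases hbk : b < k
    · have h2 := (h b hbk).1 hbk hb.1
      rw [hfb b] at h2
      have hd : decide (b < k) = true := by simpa using hbk
      rw [hd, hb.2] at h2
      exact absurd h2 (by simp)
    · rw [testBit_ge t k b ht (by omega)] at hb
      exact absurd hb.1 (by simp)
  · intro h b hb
    refine ⟨fun _ htb => ?_, fun hkb => by omega⟩
    rw [hfb b]
    have hd : decide (b < k) = true := by simpa using hb
    rw [hd]
    have hsb : s.testBit b = false := by
      have := h b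
      cases hsb : s.testBit b
      · rfl
      · exact absurd ⟨htb, hsb⟩ this
    rw [hsb]
    rfl

theorem pow_table (n : Nat) (md : Int) (hmd : 1 < md) (e : Nat) (he : e ≤ n) :
    ((List.range' 1 n).foldl (fun P i => P.set i (PySem.Int.mod (P.getD (i - 1) 1 * 2) md))
      (List.replicate (n + 1) 1)).getD e 1 = 2 ^ e % md := by
  have key : ∀ j, j ≤ n →
      ((List.range' 1 j).foldl (fun P i => P.set i (PySem.Int.mod (P.getD (i - 1) 1 * 2) md))
        (List.replicate (n + 1) 1)).length = n + 1 ∧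
      ∀ e, ((List.range' 1 j).foldl (fun P i => P.set i (PySem.Int.mod (P.getD (i - 1) 1 * 2) md))
        (List.replicate (n + 1) 1)).getD e 1 = if 1 ≤ e ∧ e ≤ j then 2 ^ e % md else 1 := by
    intro j
    induction j with
    | zero =>
      intro _
      refine ⟨by simp, ?_⟩
      intro e
      rw [if_neg (by omega)]
      simp only [List.range'_zero, List.foldl_nil, List.getD_eq_getElem?_getD,
        List.getElem?_replicate]
      split <;> rfl
    | succ j ihj =>
      intro hj
      obtain ⟨ihlen, ihget⟩ := ihj (by omega)
      rw [List.range'_concat, List.foldl_append, List.foldl_cons, List.foldl_nil]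
      have hstep : (1 + 1 * j) = j + 1 := by omega
      rw [hstep]
      refine ⟨by rw [List.length_set, ihlen], ?_⟩
      intro e
      rw [getD_set, ihlen]
      have hval : (if 1 ≤ j + 1 - 1 ∧ j + 1 - 1 ≤ j then (2 : Int) ^ (j + 1 - 1) % md else 1)
          = 2 ^ j % md := by
        rcases Nat.eq_zero_or_pos j with hj0 | hj0
        · subst hj0
          rw [if_neg (by omega), pow_zero, Int.emod_eq_of_lt (by omega) (by omega)]
        · rw [if_pos (by omega), show j + 1 - 1 = j from by omega]
      by_cases he : e = j + 1
      · subst he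
        rw [if_pos ⟨rfl, by omega⟩, if_pos (by omega), ihget, hval,
          PySem.Int.mod_eq_emod_of_pos (by omega), Int.mul_emod,
          Int.emod_emod_of_dvd _ dvd_rfl, ← Int.mul_emod, ← pow_succ]
      · rw [if_neg (by tauto), ihget]
        by_cases h1 : 1 ≤ e ∧ e ≤ j
        · rw [if_pos h1, if_pos (by omega)]
        · rw [if_neg h1, if_neg (by omega)]
  obtain ⟨_, hget⟩ := key n le_rfl
  rw [hget e]
  by_cases h0 : e = 0
  · subst h0
    rw [if_neg (by omega), pow_zero, Int.emod_eq_of_lt (by omega) (by omega)]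
  · rw [if_pos (by omega)]

theorem and_mod_left (x s j : Nat) (hs : s < 2 ^ j) : x &&& s = (x % 2 ^ j) &&& s := by
  apply Nat.eq_of_testBit_eq
  intro b
  rw [Nat.testBit_and, Nat.testBit_and, Nat.testBit_mod_two_pow]
  by_cases hb : b < j
  · rw [show decide (b < j) = true from by simpa using hb]
    rfl
  · rw [testBit_ge s j b hs (by omega)]
    simp

theorem and_mod_right (t s j : Nat) (ht : t < 2 ^ j) : t &&& s = t &&& (s % 2 ^ j) := by
  apply Nat.eq_of_testBit_eq
  intro b
  rw [Nat.testBit_and, Nat.testBit_and, Nat.testBit_mod_two_pow]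
  by_cases hb : b < j
  · rw [show decide (b < j) = true from by simpa using hb]
    rw [Bool.true_and]
  · rw [testBit_ge t j b ht (by omega)]
    simp

theorem testBit_add_pow (j t : Nat) (ht : t < 2 ^ j) : (2 ^ j + t).testBit j = true := by
  rw [Nat.testBit_eq_decide_div_mod_eq, Nat.add_comm, Nat.add_div_right _ (Nat.two_pow_pos j),
    Nat.div_eq_of_lt ht]
  norm_num

theorem filter_map_sum (l : List Nat) (g : Nat → Nat) (p : Nat → Bool) (F : Nat → Int) :
    (((l.map g).filter p).map F).sum = ((l.filter fun t => p (g t)).map fun t => F (g t)).sum := by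
  induction l with
  | nil => rfl
  | cons a l ih =>
    simp only [List.map_cons, List.filter_cons]
    by_cases hp : p (g a) = true
    · simp only [hp, if_true, List.map_cons, List.sum_cons, ih]
    · simp only [hp, Bool.false_eq_true, if_false, ih]

theorem pvDisj_spec : ∀ (j : Nat) (f : List Int), f.length = 2 ^ j →
    (pvDisjL f).length = 2 ^ j ∧ ∀ s, s < 2 ^ j → (pvDisjL f).getD s 0 =
      (((List.range (2 ^ j)).filter fun t => t &&& s == 0).map fun t => f.getD t 0).sum := by
  intro j
  induction j with
  | zero =>
    intro f hf
    rw [pvDisjL, if_pos (by omega)]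
    refine ⟨hf, fun s hs => ?_⟩
    have hs0 : s = 0 := by omega
    subst hs0
    rw [pow_zero, List.range_one]
    simp
  | succ j ih =>
    intro f hf
    have hpow : (2 : Nat) ^ (j + 1) = 2 ^ j + 2 ^ j := by rw [Nat.pow_succ]; omega
    have hj0 : (0 : Nat) < 2 ^ j := Nat.two_pow_pos j
    rw [pvDisjL, if_neg (by rw [hf]; omega)]
    have hhalf : f.length / 2 = 2 ^ j := by
      rw [hf, Nat.pow_succ, Nat.mul_div_cancel _ (by norm_num)]
    rw [hhalf]
    have htlen : (f.take (2 ^ j)).length = 2 ^ j := by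
      rw [List.length_take, hf]
      exact min_eq_left (by omega)
    have hdlen : (f.drop (2 ^ j)).length = 2 ^ j := by
      rw [List.length_drop, hf]
      omega
    obtain ⟨lolen, loget⟩ := ih (f.take (2 ^ j)) htlen
    obtain ⟨hilen, higet⟩ := ih (f.drop (2 ^ j)) hdlen
    have htake : ∀ t, t < 2 ^ j → (f.take (2 ^ j)).getD t 0 = f.getD t 0 := by
      intro t htj
      rw [List.getD_eq_getElem?_getD, List.getD_eq_getElem?_getD, List.getElem?_take, if_pos htj]
    have hdrop : ∀ t, (f.drop (2 ^ j)).getD t 0 = f.getD (2 ^ j + t) 0 := by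
      intro t
      rw [List.getD_eq_getElem?_getD, List.getD_eq_getElem?_getD, List.getElem?_drop]
    refine ⟨?_, ?_⟩
    · rw [List.length_append, List.length_map, List.length_range, lolen, hpow]
    · intro s hs
      rw [hpow, List.range_add, List.filter_append, List.map_append, List.sum_append,
        filter_map_sum]
      by_cases hsj : s < 2 ^ j
      · have hL : (((List.range (2 ^ j)).map fun s =>
              (pvDisjL (f.take (2 ^ j))).getD s 0 + (pvDisjL (f.drop (2 ^ j))).getD s 0)
              ++ pvDisjL (f.take (2 ^ j))).getD s 0
            = (pvDisjL (f.take (2 ^ j))).getD s 0 + (pvDisjL (f.drop (2 ^ j))).getD s 0 := by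
          rw [List.getD_eq_getElem?_getD,
            List.getElem?_append_left (by rw [List.length_map, List.length_range]; exact hsj),
            List.getElem?_map, List.getElem?_range hsj]
          rfl
        rw [hL, loget s hsj, higet s hsj]
        have hfc : List.filter (fun t => (2 ^ j + t) &&& s == 0) (List.range (2 ^ j))
            = List.filter (fun t => t &&& s == 0) (List.range (2 ^ j)) := by
          apply List.filter_congr
          intro t htm
          have : (2 ^ j + t) &&& s = t &&& s := by
            rw [and_mod_left _ s j hsj, Nat.add_mod_left, Nat.mod_eq_of_lt (List.mem_range.mp htm)]
          rw [this]
        rw [hfc]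
        congr 1
        · apply congrArg List.sum
          apply List.map_congr_left
          intro t htm
          exact htake t (List.mem_range.mp (List.mem_filter.mp htm).1)
        · apply congrArg List.sum
          apply List.map_congr_left
          intro t _
          exact hdrop t
      · have hs' : s - 2 ^ j < 2 ^ j := by omega
        have hL : (((List.range (2 ^ j)).map fun s =>
              (pvDisjL (f.take (2 ^ j))).getD s 0 + (pvDisjL (f.drop (2 ^ j))).getD s 0)
              ++ pvDisjL (f.take (2 ^ j))).getD s 0
            = (pvDisjL (f.take (2 ^ j))).getD (s - 2 ^ j) 0 := by
          rw [List.getD_eq_getElem?_getD,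
            List.getElem?_append_right (by rw [List.length_map, List.length_range]; omega),
            List.length_map, List.length_range, ← List.getD_eq_getElem?_getD]
        rw [hL, loget (s - 2 ^ j) hs']
        have hmod : s % 2 ^ j = s - 2 ^ j := by
          rw [show s = (s - 2 ^ j) + 2 ^ j from by omega, Nat.add_mod_right,
            Nat.mod_eq_of_lt hs']
          omega
        have hfc : List.filter (fun t => t &&& s == 0) (List.range (2 ^ j))
            = List.filter (fun t => t &&& (s - 2 ^ j) == 0) (List.range (2 ^ j)) := by
          apply List.filter_congr
          intro t htm
          rw [and_mod_right t s j (List.mem_range.mp htm), hmod]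
        have hempty : List.filter (fun t => (2 ^ j + t) &&& s == 0) (List.range (2 ^ j)) = [] := by
          rw [List.filter_eq_nil_iff]
          intro t htm
          have h1 : (2 ^ j + t).testBit j = true := testBit_add_pow j t (List.mem_range.mp htm)
          have h2 : s.testBit j = true := by
            rw [show s = 2 ^ j + (s - 2 ^ j) from by omega]
            exact testBit_add_pow j (s - 2 ^ j) hs'
          simp only [beq_iff_eq]
          intro hc
          have := congrArg (fun x => Nat.testBit x j) hc
          simp only [Nat.testBit_and, Nat.zero_testBit, h1, h2] at this
          exact absurd this (by simp)
        rw [hfc, hempty]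
        simp only [List.map_nil, List.sum_nil, add_zero]
        apply congrArg List.sum
        apply List.map_congr_left
        intro t htm
        exact htake t (List.mem_range.mp (List.mem_filter.mp htm).1)

theorem pvDisj_toList (f : Array Int) : (pvDisj f).toList = pvDisjL f.toList := by
  suffices H : ∀ (n : Nat) (f : Array Int), f.size = n → (pvDisj f).toList = pvDisjL f.toList by
    exact H f.size f rfl
  intro n
  induction n using Nat.strong_induction_on with
  | _ n ih =>
    intro f hf
    rw [pvDisj, pvDisjL, Array.length_toList]
    by_cases h1 : f.size ≤ 1
    · rw [if_pos h1, if_pos h1]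
    · rw [if_neg h1, if_neg h1]
      have hsz : 2 ≤ f.size := by omega
      have hlo : (pvDisj (f.extract 0 (f.size / 2))).toList
          = pvDisjL (f.toList.take (f.size / 2)) := by
        rw [ih (f.extract 0 (f.size / 2)).size (by simp [Array.size_extract]; omega) _ rfl,
          Array.toList_extract, List.extract_eq_drop_take, List.drop_zero, Nat.sub_zero]
      have hhi : (pvDisj (f.extract (f.size / 2) f.size)).toList
          = pvDisjL (f.toList.drop (f.size / 2)) := by
        rw [ih (f.extract (f.size / 2) f.size).size (by simp [Array.size_extract]; omega) _ rfl,
          Array.toList_extract, List.extract_eq_drop_take]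
        congr 1
        rw [show f.size - f.size / 2 = (f.toList.drop (f.size / 2)).length from by
          rw [List.length_drop, Array.length_toList]]
        exact List.take_length
      simp only [Array.toList_append, Array.toList_map, Array.toList_range, Array.length_toList]
      congr 1
      apply List.map_congr_left
      intro s _
      rw [arr_getD, arr_getD, hlo, hhi]

theorem pv_sum_map_add' {l : List Nat} (f g : Nat → Int) :
    (l.map fun t => f t + g t).sum = (l.map f).sum + (l.map g).sum := by
  induction l with
  | nil => simp
  | cons a l ih => simp [ih]; ring

theorem sum_ind (l : List Nat) (hnd : l.Nodup) (x : Nat) :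
    (l.map fun t => (if x = t then (1 : Int) else 0)).sum = if x ∈ l then 1 else 0 := by
  induction l with
  | nil => simp
  | cons a l ih =>
    rcases List.nodup_cons.mp hnd with ⟨hna, hnd'⟩
    simp only [List.map_cons, List.sum_cons, ih hnd', List.mem_cons]
    by_cases hxa : x = a
    · subst hxa
      rw [if_pos rfl, if_pos (Or.inl rfl), if_neg (by simpa using hna)]
      ring
    · rw [if_neg hxa]
      by_cases hxl : x ∈ l
      · rw [if_pos hxl, if_pos (Or.inr hxl)]; ring
      · rw [if_neg hxl, if_neg (by tauto)]; ring

theorem sum_fiber_count (msks : List Nat) (l : List Nat) (hnd : l.Nodup) (q : Nat → Bool)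
    (hq : ∀ x ∈ msks, (x ∈ l ↔ q x = true)) :
    (l.map fun t => (msks.countP (fun y => y == t) : Int)).sum = (msks.countP q : Int) := by
  induction msks with
  | nil => simp
  | cons x ms ih =>
    have hsplit : (l.map fun t => (List.countP (fun y => y == t) (x :: ms) : Int)).sum
        = (l.map fun t => (List.countP (fun y => y == t) ms : Int)).sum
          + (l.map fun t => (if x = t then (1 : Int) else 0)).sum := by
      rw [← pv_sum_map_add']
      apply congrArg List.sum
      apply List.map_congr_left
      intro t _
      rw [List.countP_cons]
      by_cases hxt : x = t <;> simp [hxt]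
    rw [hsplit, ih (fun y hy => hq y (by simp [hy])), sum_ind l hnd x, List.countP_cons]
    have hx := hq x (by simp)
    by_cases hqx : q x = true
    · rw [if_pos (hx.mpr hqx)]
      simp only [hqx, if_true]
      push_cast
      ring
    · have hqx' : q x = false := by revert hqx; cases q x <;> simp
      rw [if_neg (fun hc => hqx (hx.mp hc))]
      simp only [hqx', Bool.false_eq_true, if_false]
      push_cast
      ring

theorem mod_add_left (md x t : Int) (hmd : 0 < md) :
    PySem.Int.mod (PySem.Int.mod x md + t) md = PySem.Int.mod (x + t) md := by
  rw [PySem.Int.mod_eq_emod_of_pos hmd, PySem.Int.mod_eq_emod_of_pos hmd,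
    PySem.Int.mod_eq_emod_of_pos hmd]
  exact Int.emod_add_emod x md t

theorem mod_sub_left (md x t : Int) (hmd : 0 < md) :
    PySem.Int.mod (PySem.Int.mod x md - t) md = PySem.Int.mod (x - t) md := by
  rw [PySem.Int.mod_eq_emod_of_pos hmd, PySem.Int.mod_eq_emod_of_pos hmd,
    PySem.Int.mod_eq_emod_of_pos hmd]
  conv_lhs => rw [Int.sub_emod]
  rw [Int.emod_emod_of_dvd _ dvd_rfl, ← Int.sub_emod]

theorem fold_mod (md : Int) (hmd : 0 < md) (tA tB : Nat → Bool → Int) :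
    ∀ (l : List Nat) (x : Int), (∀ s ∈ l, ∀ c, tA s c = tB s c) →
    l.foldl (fun (r : Int) (s : Nat) =>
        if PySem.Int.bitCount (s : Int) % 2 == 1 then PySem.Int.mod (r + tA s true) md
        else PySem.Int.mod (r - tA s false) md) (PySem.Int.mod x md) =
      PySem.Int.mod (l.foldl (fun (r : Int) (s : Nat) =>
        if PySem.Int.bitCount (s : Int) % 2 == 1 then r + tB s true else r - tB s false) x) md := by
  intro l
  induction l with
  | nil => intro x _; rfl
  | cons s rest ih =>
    intro x h
    simp only [List.foldl_cons]
    rw [h s (by simp) true, h s (by simp) false]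
    by_cases hc : (PySem.Int.bitCount (s : Int) % 2 == 1) = true
    · rw [if_pos hc, if_pos hc, mod_add_left md x (tB s true) hmd]
      exact ih (x + tB s true) (fun u hu c => h u (by simp [hu]) c)
    · rw [if_neg hc, if_neg hc, mod_sub_left md x (tB s false) hmd]
      exact ih (x - tB s false) (fun u hu c => h u (by simp [hu]) c)

theorem main_eq (nums : List Int) : countEffective nums = countEffective_alt nums := by
  simp only [countEffective, countEffective_alt, Nat.shiftLeft_eq, one_mul]
  have hmd : (0 : Int) < 10 ^ 9 + 7 := by norm_num
  set bits := pvBits (pvTotalOr nums) with hbits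
  set k := bits.length with hk
  -- bridge the Array-valued port computations to their list twins
  have hsos : ∀ m (d : Int), ((List.range k).foldl (fun F i =>
        (List.range (2 ^ k)).foldl (fun F mask =>
          if (mask &&& 2 ^ i) != 0 then
            F.setIfInBounds mask (F.getD mask 0 + F.getD (mask ^^^ 2 ^ i) 0)
          else F) F) (pvFreq nums bits)).getD m d
      = ((List.range k).foldl (fun F i =>
        (List.range (2 ^ k)).foldl (fun F mask =>
          if (mask &&& 2 ^ i) != 0 then F.set mask (F.getD mask 0 + F.getD (mask ^^^ 2 ^ i) 0)
          else F) F) (pvFreqL nums bits)).getD m d := by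
    intro m d
    rw [arr_getD, foldl_toList _ _ ?_ (List.range k), pvFreq_toList]
    intro a i
    rw [foldl_toList _ _ ?_ (List.range (2 ^ k))]
    intro a' mask
    split
    · rw [Array.toList_setIfInBounds, arr_getD, arr_getD]
    · rfl
  have hP2 : ∀ e (d : Int), ((List.range' 1 nums.length).foldl
        (fun P i => P.setIfInBounds i (PySem.Int.mod (P.getD (i - 1) 1 * 2) (10 ^ 9 + 7)))
        (Array.replicate (nums.length + 1) 1)).getD e d
      = ((List.range' 1 nums.length).foldl
        (fun P i => P.set i (PySem.Int.mod (P.getD (i - 1) 1 * 2) (10 ^ 9 + 7)))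
        (List.replicate (nums.length + 1) 1)).getD e d := by
    intro e d
    rw [arr_getD, foldl_toList _ _ ?_ (List.range' 1 nums.length), Array.toList_replicate]
    intro a i
    rw [Array.toList_setIfInBounds, arr_getD]
  have hgb : ∀ s (d : Int), (pvDisj (pvFreq nums bits)).getD s d
      = (pvDisjL (pvFreqL nums bits)).getD s d := by
    intro s d
    rw [arr_getD, pvDisj_toList, pvFreq_toList]
  simp only [hsos, hP2, hgb]
  set freq := pvFreqL nums bits with hfreqd
  set msks := nums.map fun num => pvMask num bits with hmsksd
  have hmsk : ∀ x ∈ msks, x < 2 ^ k := by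
    intro x hx
    rcases List.mem_map.mp hx with ⟨num, _, rfl⟩
    exact pvMask_lt num bits
  have hlen : freq.length = 2 ^ k := pvFreq_length nums bits
  obtain ⟨Flen, Fget⟩ := sos_inv k msks hmsk freq hlen (fun m _ => pvFreq_getD nums bits m) k le_rfl
  obtain ⟨glen, gget⟩ := pvDisj_spec k freq hlen
  set F := (List.range k).foldl (fun F i =>
    (List.range (2 ^ k)).foldl (fun F mask =>
      if (mask &&& 2 ^ i) != 0 then F.set mask (F.getD mask 0 + F.getD (mask ^^^ 2 ^ i) 0)
      else F) F) freq with hFd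
  set P2 := (List.range' 1 nums.length).foldl
    (fun P i => P.set i (PySem.Int.mod (P.getD (i - 1) 1 * 2) (10 ^ 9 + 7)))
    (List.replicate (nums.length + 1) 1) with hP2d
  set g := pvDisjL freq with hgd
  have hpos := Nat.two_pow_pos k
  have hterm : ∀ s ∈ List.range' 1 (2 ^ k - 1),
      P2.getD (F.getD ((2 ^ k - 1) ^^^ s) 0).toNat 1
        = PySem.Int.powMod 2 ((g.getD s 0).toNat) (10 ^ 9 + 7) := by
    intro s hs
    have hs1 := List.mem_range'_1.mp hs
    have hs2 : s < 2 ^ k := by omega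
    have hx : (2 ^ k - 1) ^^^ s < 2 ^ k := Nat.xor_lt_two_pow (by omega) hs2
    have hFval : F.getD ((2 ^ k - 1) ^^^ s) 0 = (msks.countP (fun t => t &&& s == 0) : Int) := by
      rw [hFd, Fget _ hx]
      congr 1
      apply List.countP_congr
      intro t htm
      rw [agree_final k t s (hmsk t htm) hs2]
    have hgval : g.getD s 0 = (msks.countP (fun t => t &&& s == 0) : Int) := by
      rw [hgd, gget s hs2]
      have hmapc : ((List.range (2 ^ k)).filter (fun t => t &&& s == 0)).map
            (fun t => freq.getD t 0)
          = ((List.range (2 ^ k)).filter (fun t => t &&& s == 0)).map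
            (fun t => (msks.countP (fun y => y == t) : Int)) := by
        apply List.map_congr_left
        intro t _
        exact pvFreq_getD nums bits t
      rw [hmapc]
      apply sum_fiber_count msks _ (List.Nodup.filter _ List.nodup_range)
      intro x hx'
      rw [List.mem_filter]
      exact ⟨fun h => h.2, fun h => ⟨List.mem_range.mpr (hmsk x hx'), h⟩⟩
    have hcnt : msks.countP (fun t => t &&& s == 0) ≤ nums.length := by
      have h1 := List.countP_le_length (p := fun t => t &&& s == 0) (l := msks)
      have h2 : msks.length = nums.length := by rw [hmsksd, List.length_map]
      omega
    rw [hFval, hgval, Int.toNat_natCast, hP2d,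
      pow_table nums.length (10 ^ 9 + 7) (by norm_num) _ hcnt,
      PySem.Int.powMod_eq_emod 2 _ hmd]
  have hfold := fold_mod (10 ^ 9 + 7) hmd
    (fun s _ => P2.getD (F.getD ((2 ^ k - 1) ^^^ s) 0).toNat 1)
    (fun s _ => PySem.Int.powMod 2 ((g.getD s 0).toNat) (10 ^ 9 + 7))
    (List.range' 1 (2 ^ k - 1)) 0 (fun s hs _ => hterm s hs)
  simp only [] at hfold
  rw [show PySem.Int.mod (0 : Int) (10 ^ 9 + 7) = 0 from by
    rw [PySem.Int.mod_eq_emod_of_pos hmd]; simp] at hfold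
  rw [hfold]
  simp only [PySem.Int.mod_eq_emod_of_pos hmd]
  exact Int.emod_emod_of_dvd _ dvd_rfl

-- ===== VERDICT (by name: the statement is the Claim_ definition above) =====
theorem countEffective_spec : Claim_equal_countEffective := by
  unfold Claim_equal_countEffective
  intro nums _
  unfold Spec_countEffective
  exact main_eq nums
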